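-- pv_equiv track=rewrite | github.com/frostburn/hewmp | chord_parser.py | separate_by_arrows
-- ===== SOURCE A (Python) =====
-- ARROWS = "+-><^vudUDAVMWi!*%"
--
-- def separate_by_arrows(token):
--     separated = []
--     current_arrow_token = ""
--     for character in token:
--         if character in ARROWS:
--             separated.append(current_arrow_token)
--             current_arrow_token = ""
--         current_arrow_token += character
--     separated.append(current_arrow_token)
--     return separated
-- ===== SOURCE B (Python) =====
-- ARROWS = "+-><^vudUDAVMWi!*%"
--
-- def separate_by_arrows(token):
--     # Right-to-left index scan: at each arrow at index k emit the slice token[k:end]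
--     # and move the end down to k; finally the arrow-free prefix token[:end];
--     # the collected list comes out rightmost-first, so reverse it.
--     segs = []
--     end = len(token)
--     k = end - 1
--     while k >= 0:
--         if token[k] in ARROWS:
--             segs.append(token[k:end])
--             end = k
--         k -= 1
--     segs.append(token[:end])
--     segs.reverse()
--     return segs
-- ===== Notes on version B (the rewrite author's own statement) =====
-- stated objective: alternative
-- what changed: B scans the token right-to-left by index, emitting the slice token[k:end] at each arrow index k and the arrow-free prefix at the end, then reverses the collected list, instead of A's left-to-right per-character string accumulation with flush-on-arrow.
import Mathlib
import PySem

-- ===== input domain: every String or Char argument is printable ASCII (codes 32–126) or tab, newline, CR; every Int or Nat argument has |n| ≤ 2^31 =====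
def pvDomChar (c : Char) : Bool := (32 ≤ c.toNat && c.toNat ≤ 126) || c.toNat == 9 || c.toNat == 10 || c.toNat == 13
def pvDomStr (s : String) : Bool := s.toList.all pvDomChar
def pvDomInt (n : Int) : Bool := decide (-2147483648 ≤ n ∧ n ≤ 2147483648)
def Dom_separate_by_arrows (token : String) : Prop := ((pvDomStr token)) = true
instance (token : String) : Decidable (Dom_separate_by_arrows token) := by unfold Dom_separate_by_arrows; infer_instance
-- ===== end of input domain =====

-- B scans the token right-to-left by index, emitting a slice at each arrow index,
-- instead of A's left-to-right per-character accumulation; objective: alternative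
-- (same O(n) cost, opposite traversal, slicing instead of character accumulation).

-- ===== PORT A =====
def pvARROWS : List Char := "+-><^vudUDAVMWi!*%".toList

-- left-to-right fold over the characters, state = (separated, current_arrow_token)
-- (strings handled as List Char, turned into String with String.mk when appended)
def separate_by_arrows (token : String) : List String :=
  let st := token.toList.foldl
    (fun (st : List String × List Char) character =>
      let st := if pvARROWS.contains character
        then (st.1 ++ [String.mk st.2], ([] : List Char))
        else st
      (st.1, st.2 ++ [character]))
    ([], [])
  st.1 ++ [String.mk st.2]

-- ===== PORT B =====
-- Source B's while loop over k = len-1 .. 0 with state (segs, end); encoded as recursion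
-- on j = k+1 (j = 0 means k = -1, loop finished).  token[k] with 0 ≤ k < len is exactly
-- cs.getD k; the slice token[k:end] with 0 ≤ k ≤ end ≤ len is exactly (cs.drop k).take (end-k).
def pvCutRev (cs : List Char) : Nat → Nat → List String × Nat
  | 0, e => ([], e)
  | j + 1, e =>
    if pvARROWS.contains (cs.getD j ' ') then
      let r := pvCutRev cs j j
      (String.mk ((cs.drop j).take (e - j)) :: r.1, r.2)
    else
      pvCutRev cs j e

def separate_by_arrows_alt (token : String) : List String :=
  let cs := token.toList
  let r := pvCutRev cs cs.length cs.length
  -- segs.append(token[:end]); segs.reverse()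
  (r.1 ++ [String.mk (cs.take r.2)]).reverse

-- ===== PRECONDITION & SPEC =====
def Spec_separate_by_arrows (token : String) (out : List String) : Prop := out = separate_by_arrows_alt token
instance (token : String) (out : List String) : Decidable (Spec_separate_by_arrows token out) := by unfold Spec_separate_by_arrows; infer_instance

-- ===== CLAIM (what is proved, stated in full; the proofs are below) =====
def Claim_equal_separate_by_arrows : Prop := ∀ (token : String), Dom_separate_by_arrows token → Spec_separate_by_arrows token (separate_by_arrows token)

-- ===== LEMMAS AND PROOFS =====

-- recursive characterisation of A's loop (proof helper)
def pvRecA (cur : List Char) : List Char → List String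
  | [] => [String.mk cur]
  | c :: cs =>
    if pvARROWS.contains c then String.mk cur :: pvRecA [c] cs
    else pvRecA (cur ++ [c]) cs

theorem pvFoldlA_eq (cs : List Char) : ∀ (sep : List String) (cur : List Char),
    (let st := cs.foldl
        (fun (st : List String × List Char) character =>
          let st := if pvARROWS.contains character
            then (st.1 ++ [String.mk st.2], ([] : List Char))
            else st
          (st.1, st.2 ++ [character]))
        (sep, cur)
     st.1 ++ [String.mk st.2]) = sep ++ pvRecA cur cs := by
  induction cs with
  | nil => intro sep cur; simp [pvRecA]
  | cons c cs ih =>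
    intro sep cur
    by_cases h : c ∈ pvARROWS
    · simpa [List.foldl_cons, h, pvRecA] using ih (sep ++ [String.mk cur]) [c]
    · simpa [List.foldl_cons, h, pvRecA] using ih sep (cur ++ [c])

-- arrow-free suffix: A's recursion just closes the current segment
theorem pvRecA_free (w : List Char) : ∀ (cur : List Char),
    (∀ c ∈ w, c ∉ pvARROWS) → pvRecA cur w = [String.mk (cur ++ w)] := by
  induction w with
  | nil => intro cur _; simp [pvRecA]
  | cons c w ih =>
    intro cur h
    have hc : c ∉ pvARROWS := h c (by simp)
    simp only [pvRecA, List.contains_eq_mem, hc, decide_false, Bool.false_eq_true, if_false]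
    rw [ih (cur ++ [c]) (fun x hx => h x (by simp [hx]))]
    simp

-- splitting off the segment that starts at the last arrow
theorem pvRecA_append (u : List Char) : ∀ (cur : List Char) (c : Char) (w : List Char),
    c ∈ pvARROWS → (∀ x ∈ w, x ∉ pvARROWS) →
    pvRecA cur (u ++ c :: w) = pvRecA cur u ++ [String.mk (c :: w)] := by
  induction u with
  | nil =>
    intro cur c w hc hw
    simp only [List.nil_append, pvRecA, List.contains_eq_mem, hc, decide_true, if_true]
    rw [pvRecA_free w [c] hw]; simp
  | cons x u ih =>
    intro cur c w hc hw
    by_cases hx : x ∈ pvARROWS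
    · simp only [List.cons_append, pvRecA, List.contains_eq_mem, hx, decide_true, if_true]
      rw [ih [x] c w hc hw]
    · simp only [List.cons_append, pvRecA, List.contains_eq_mem, hx, decide_false,
        Bool.false_eq_true, if_false]
      rw [ih (cur ++ [x]) c w hc hw]

-- loop invariant: with [j, e) arrow-free, the loop's result for indices < j combined
-- with the pending prefix equals A's recursion on the prefix cs.take e
theorem pvCutRev_eq (cs : List Char) : ∀ (j : Nat), ∀ (e : Nat), j ≤ e → e ≤ cs.length →
    (∀ i, j ≤ i → i < e → cs.getD i ' ' ∉ pvARROWS) →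
    String.mk (cs.take (pvCutRev cs j e).2) :: (pvCutRev cs j e).1.reverse
      = pvRecA [] (cs.take e) := by
  intro j
  induction j with
  | zero =>
    intro e _ he hfree
    simp only [pvCutRev]
    rw [pvRecA_free (cs.take e) []
      (fun c hc => by
        obtain ⟨i, hi, rfl⟩ := List.getElem_of_mem hc
        have hi' : i < e := lt_of_lt_of_le hi (by simp)
        have := hfree i (Nat.zero_le i) hi'
        simpa [List.getElem_take, List.getD_eq_getElem?_getD,
          List.getElem?_eq_getElem (lt_of_lt_of_le hi' he)] using this)]
    simp
  | succ j ih =>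
    intro e hje he hfree
    by_cases harr : cs.getD j ' ' ∈ pvARROWS
    · simp only [pvCutRev, List.contains_eq_mem, harr, decide_true, if_true]
      have hj : j < cs.length := lt_of_lt_of_le hje he
      have harr' : cs[j] ∈ pvARROWS := by
        rwa [List.getD_eq_getElem?_getD, List.getElem?_eq_getElem hj] at harr
      have hdrop : (cs.drop j).take (e - j) = cs[j] :: (cs.drop (j+1)).take (e - j - 1) := by
        rw [List.drop_eq_getElem_cons hj, show e - j = (e - j - 1) + 1 by omega,
          List.take_succ_cons]
        simp
      have hkey : cs.take e = cs.take j ++ cs[j] :: ((cs.drop (j+1)).take (e - j - 1)) := by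
        conv_lhs => rw [show e = j + (e - j) by omega]
        rw [List.take_add, hdrop]
      have hfree' : ∀ x ∈ (cs.drop (j+1)).take (e - j - 1), x ∉ pvARROWS := by
        intro x hx
        obtain ⟨i, hi, rfl⟩ := List.getElem_of_mem hx
        have hi1 : i < e - j - 1 := lt_of_lt_of_le hi (by simp)
        have hlen : j + 1 + i < cs.length := by
          have := (List.length_take ..) ▸ hi
          omega
        have := hfree (j + 1 + i) (by omega) (by omega)
        rw [List.getD_eq_getElem?_getD, List.getElem?_eq_getElem hlen] at this
        simpa [List.getElem_take, List.getElem_drop] using this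
      rw [hkey, pvRecA_append (cs.take j) [] cs[j] _ harr' hfree',
        ← ih j le_rfl (le_of_lt hj) (fun i h1 h2 => absurd (lt_of_le_of_lt h1 h2) (lt_irrefl _))]
      simp [hdrop]
    · simp only [pvCutRev, List.contains_eq_mem, harr, decide_false,
        Bool.false_eq_true, if_false]
      exact ih e (le_of_lt hje) he
        (fun i hji hie => by
          rcases Nat.eq_or_lt_of_le hji with rfl | h
          · exact harr
          · exact hfree i h hie)

-- ===== VERDICT (by name: the statement is the Claim_ definition above) =====
theorem separate_by_arrows_spec : Claim_equal_separate_by_arrows := by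
  intro token _
  unfold Spec_separate_by_arrows separate_by_arrows separate_by_arrows_alt
  rw [pvFoldlA_eq token.toList [] []]
  rw [List.reverse_append, List.reverse_singleton, List.singleton_append]
  rw [pvCutRev_eq token.toList token.toList.length token.toList.length le_rfl le_rfl
    (fun i hi₁ hi₂ => absurd (lt_of_le_of_lt hi₁ hi₂) (lt_irrefl _))]
  simp
  rw [← String.length_toList, List.take_length]
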